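-- pv_equiv track=rewrite | github.com/RemiH06/Mapo | indicator_scraper.py | count_unique_ids_by_banco
-- ===== SOURCE A (Python) =====
-- def filter_by_banco(data, banco):
--     return [row for row in data if row[2] == banco]
--
-- def count_unique_ids_by_banco(data):
--     # Filtrar datos para BIE
--     bie_data = filter_by_banco(data, 'BIE')
--     bie_ids = [row[1] for row in bie_data]
--     bie_unique_ids = set(bie_ids)  # IDs únicos para BIE
--
--     # Filtrar datos para BISE
--     bise_data = filter_by_banco(data, 'BISE')
--     bise_ids = [row[1] for row in bise_data]
--     bise_unique_ids = set(bise_ids)  # IDs únicos para BISE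
--
--     # Contar IDs totales y únicos por banco
--     total_bie_ids = len(bie_ids)
--     total_bise_ids = len(bise_ids)
--     total_unique_bie_ids = len(bie_unique_ids)
--     total_unique_bise_ids = len(bise_unique_ids)
--
--     return total_bie_ids, total_bise_ids, total_unique_bie_ids, total_unique_bise_ids
-- ===== SOURCE B (Python) =====
-- def count_unique_ids_by_banco(data):
--     # Single pass: two counters and two sets instead of two filtered scans.
--     bie_total = bise_total = 0
--     bie_ids = set()
--     bise_ids = set()
--     for row in data:
--         if row[2] == 'BIE':
--             bie_total += 1
--             bie_ids.add(row[1])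
--         elif row[2] == 'BISE':
--             bise_total += 1
--             bise_ids.add(row[1])
--     return bie_total, bise_total, len(bie_ids), len(bise_ids)
-- ===== Notes on version B (the rewrite author's own statement) =====
-- stated objective: simpler
-- what changed: Replaces A's two filter-then-project scans plus intermediate lists/sets by a single pass over data maintaining two counters and two sets.
import Mathlib
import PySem

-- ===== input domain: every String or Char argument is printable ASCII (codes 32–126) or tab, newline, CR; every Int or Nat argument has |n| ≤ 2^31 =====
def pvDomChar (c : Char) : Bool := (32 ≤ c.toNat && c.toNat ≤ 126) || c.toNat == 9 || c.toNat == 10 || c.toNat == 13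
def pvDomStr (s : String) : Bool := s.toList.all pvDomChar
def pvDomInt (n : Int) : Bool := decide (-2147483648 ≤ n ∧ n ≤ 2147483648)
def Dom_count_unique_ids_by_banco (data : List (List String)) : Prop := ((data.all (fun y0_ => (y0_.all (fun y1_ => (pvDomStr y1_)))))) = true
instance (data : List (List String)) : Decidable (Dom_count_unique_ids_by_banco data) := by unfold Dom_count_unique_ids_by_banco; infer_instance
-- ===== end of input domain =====

-- B replaces A's two filtered scans with one pass keeping two counters and two sets; equal on rows of length ≥ 3 (A raises IndexError otherwise).


-- ===== PORT A =====
-- row[2] / row[1] via pyGet?; under Pre_ every row has length ≥ 3 so the index is in range and the default is never used.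
def pvFilterByBanco (data : List (List String)) (banco : String) : List (List String) :=
  data.filter (fun row => ((PySem.List.pyGet? row 2).getD "") == banco)

def count_unique_ids_by_banco (data : List (List String)) : Int × Int × Int × Int :=
  let bie_data := pvFilterByBanco data "BIE"
  let bie_ids := bie_data.map (fun row => (PySem.List.pyGet? row 1).getD "")
  let bie_unique_ids : PySem.Set String := PySem.Set.ofList bie_ids
  let bise_data := pvFilterByBanco data "BISE"
  let bise_ids := bise_data.map (fun row => (PySem.List.pyGet? row 1).getD "")
  let bise_unique_ids : PySem.Set String := PySem.Set.ofList bise_ids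
  ((bie_ids.length : Int), (bise_ids.length : Int),
   (PySem.Set.len bie_unique_ids), (PySem.Set.len bise_unique_ids))

-- ===== PORT B =====
def pvLoopB : List (List String) → Int → Int → PySem.Set String → PySem.Set String → Int × Int × Int × Int
  | [], bie_total, bise_total, bie_ids, bise_ids =>
      (bie_total, bise_total, PySem.Set.len bie_ids, PySem.Set.len bise_ids)
  | row :: rest, bie_total, bise_total, bie_ids, bise_ids =>
      if ((PySem.List.pyGet? row 2).getD "") == "BIE" then
        pvLoopB rest (bie_total + 1) bise_total
          (PySem.Set.add bie_ids ((PySem.List.pyGet? row 1).getD "")) bise_ids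
      else if ((PySem.List.pyGet? row 2).getD "") == "BISE" then
        pvLoopB rest bie_total (bise_total + 1)
          bie_ids (PySem.Set.add bise_ids ((PySem.List.pyGet? row 1).getD ""))
      else
        pvLoopB rest bie_total bise_total bie_ids bise_ids

def count_unique_ids_by_banco_alt (data : List (List String)) : Int × Int × Int × Int :=
  pvLoopB data 0 0 PySem.Set.empty PySem.Set.empty

-- ===== PRECONDITION & SPEC =====
-- Pre_: every row has length ≥ 3 (Python A raises IndexError on row[2] otherwise; B raises there too).
def Pre_count_unique_ids_by_banco (data : List (List String)) : Prop :=
  ∀ row ∈ data, 3 ≤ row.length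
instance (data : List (List String)) : Decidable (Pre_count_unique_ids_by_banco data) := by unfold Pre_count_unique_ids_by_banco; infer_instance

def pvWitness_count_unique_ids_by_banco : List (List String) :=
  [["a", "1", "BIE"], ["b", "1", "BISE"], ["c", "1", "BIE"]]

def Spec_count_unique_ids_by_banco (data : List (List String)) (out : Int × Int × Int × Int) : Prop := out = count_unique_ids_by_banco_alt data
instance (data : List (List String)) (out : Int × Int × Int × Int) : Decidable (Spec_count_unique_ids_by_banco data out) := by unfold Spec_count_unique_ids_by_banco; infer_instance

-- ===== CLAIM (what is proved, stated in full; the proofs are below) =====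
def Claim_equal_count_unique_ids_by_banco : Prop := ∀ (data : List (List String)), Dom_count_unique_ids_by_banco data → Pre_count_unique_ids_by_banco data → Spec_count_unique_ids_by_banco data (count_unique_ids_by_banco data)

-- ===== LEMMAS AND PROOFS =====
-- the ids A projects out of its filtered scan for a given banco
def pvIds (data : List (List String)) (banco : String) : List String :=
  (pvFilterByBanco data banco).map (fun row => (PySem.List.pyGet? row 1).getD "")

-- loop invariant: B's single pass equals A's per-banco projections folded onto the accumulators
theorem pvLoopB_eq (data : List (List String)) :
    ∀ (bt st : Int) (bs ss : PySem.Set String),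
    pvLoopB data bt st bs ss =
      (bt + ((pvIds data "BIE").length : Int),
       st + ((pvIds data "BISE").length : Int),
       PySem.Set.len ((pvIds data "BIE").foldl PySem.Set.add bs),
       PySem.Set.len ((pvIds data "BISE").foldl PySem.Set.add ss)) := by
  induction data with
  | nil => intro bt st bs ss; simp [pvLoopB, pvIds, pvFilterByBanco]
  | cons row rest ih =>
    intro bt st bs ss
    by_cases h1 : ((PySem.List.pyGet? row 2).getD "") = "BIE"
    · simp [pvLoopB, pvIds, pvFilterByBanco, h1, ih]
      omega
    · by_cases h2 : ((PySem.List.pyGet? row 2).getD "") = "BISE"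
      · simp [pvLoopB, pvIds, pvFilterByBanco, h2, ih]
        omega
      · simp [pvLoopB, pvIds, pvFilterByBanco, h1, h2, ih]

-- ===== VERDICT (by name: the statement is the Claim_ definition above) =====
theorem count_unique_ids_by_banco_spec : Claim_equal_count_unique_ids_by_banco := by
  intro data _ _
  unfold Spec_count_unique_ids_by_banco count_unique_ids_by_banco count_unique_ids_by_banco_alt
  rw [pvLoopB_eq]
  simp [pvIds, PySem.Set.ofList_eq_foldl, PySem.Set.empty]
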